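-- pv_equiv track=rewrite | github.com/fevitta/SqlMentor | src/sqlmentor/report.py | _strip_sql_from_plan
-- ===== SOURCE A (Python) =====
-- def _strip_sql_from_plan(plan_lines: list[str]) -> list[str]:
--
--     """Remove o SQL repetido do output do DISPLAY_CURSOR.
--
--
--     O Oracle repete o SQL no topo do plano (SQL_ID + texto da query).
--
--     Como já temos o SQL na seção 1, isso é duplicação pura.
--
--     Mantém só o Plan hash value em diante.
--     """
--
--     result = []
--
--     found_plan_hash = False
--
--     for line in plan_lines:
--
--         stripped = line.strip()
--
--         if not found_plan_hash:
--
--             # Mantém linha do SQL_ID (útil como referência)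
--
--             if stripped.startswith("SQL_ID"):
--                 result.append(line)
--                 continue
--
--             # Pula tudo até achar "Plan hash value"
--
--             if stripped.startswith("Plan hash value"):
--
--                 found_plan_hash = True
--                 result.append(line)
--                 continue
--
--             # Pula linhas de separação (----) antes do plan hash
--
--             if stripped and all(c == "-" for c in stripped):
--                 continue
--
--             # Pula o SQL repetido
--             continue
--         result.append(line)
--
--     # Fallback: se não achou Plan hash value, retorna tudo
--
--     return result if found_plan_hash else plan_lines
-- ===== SOURCE B (Python) =====
-- def _strip_sql_from_plan(plan_lines: list[str]) -> list[str]: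
--     idx = next((i for i, l in enumerate(plan_lines)
--                 if l.strip().startswith("Plan hash value")), None)
--     if idx is None:
--         return plan_lines
--     return [l for l in plan_lines[:idx] if l.strip().startswith("SQL_ID")] + plan_lines[idx:]
-- ===== Notes on version B (the rewrite author's own statement) =====
-- stated objective: simpler
-- what changed: Replaces the flag-driven accumulator loop with a boundary search (index of the first 'Plan hash value' line) followed by a prefix filter and a whole-suffix take; the not-found fallback becomes an early return.
import Mathlib
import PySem

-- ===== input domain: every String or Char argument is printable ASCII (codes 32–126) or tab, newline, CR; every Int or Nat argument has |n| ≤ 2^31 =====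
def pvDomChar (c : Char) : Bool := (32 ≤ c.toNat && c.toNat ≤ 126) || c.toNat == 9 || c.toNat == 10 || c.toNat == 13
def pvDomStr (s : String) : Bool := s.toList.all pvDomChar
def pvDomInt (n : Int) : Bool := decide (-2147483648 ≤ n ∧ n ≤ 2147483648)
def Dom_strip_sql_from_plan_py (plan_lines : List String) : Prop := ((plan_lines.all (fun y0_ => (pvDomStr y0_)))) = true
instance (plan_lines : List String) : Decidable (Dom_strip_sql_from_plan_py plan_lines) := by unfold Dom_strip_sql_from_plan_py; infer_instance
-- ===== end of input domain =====

-- B replaces A's flag-driven single-pass accumulator with a boundary search plus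
-- prefix-filter and suffix-take (objective: simpler decomposition).

-- ===== PORT A =====
-- transliteration of A's for-loop: state = (result, found_plan_hash)
def pvALoop (lines : List String) (result : List String) (found : Bool) : List String × Bool :=
  match lines with
  | [] => (result, found)
  | line :: rest =>
    let stripped := PySem.Str.strip line
    if found = false then
      if PySem.Str.startswith stripped "SQL_ID" then
        pvALoop rest (result ++ [line]) found
      else if PySem.Str.startswith stripped "Plan hash value" then
        pvALoop rest (result ++ [line]) true
      else if stripped ≠ "" ∧ stripped.toList.all (fun c => c = '-') then
        pvALoop rest result found
      else
        pvALoop rest result found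
    else
      pvALoop rest (result ++ [line]) found

def strip_sql_from_plan_py (plan_lines : List String) : List String :=
  let r := pvALoop plan_lines [] false
  if r.2 then r.1 else plan_lines

-- ===== PORT B =====
def strip_sql_from_plan_py_alt (plan_lines : List String) : List String :=
  match plan_lines.findIdx? (fun l => PySem.Str.startswith (PySem.Str.strip l) "Plan hash value") with
  | none => plan_lines
  | some idx =>
      (plan_lines.take idx).filter (fun l => PySem.Str.startswith (PySem.Str.strip l) "SQL_ID")
        ++ plan_lines.drop idx

-- ===== PRECONDITION & SPEC =====
def Spec_strip_sql_from_plan_py (plan_lines : List String) (out : List String) : Prop := out = strip_sql_from_plan_py_alt plan_lines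
instance (plan_lines : List String) (out : List String) : Decidable (Spec_strip_sql_from_plan_py plan_lines out) := by unfold Spec_strip_sql_from_plan_py; infer_instance

-- ===== CLAIM (what is proved, stated in full; the proofs are below) =====
def Claim_equal_strip_sql_from_plan_py : Prop := ∀ (plan_lines : List String), Dom_strip_sql_from_plan_py plan_lines → Spec_strip_sql_from_plan_py plan_lines (strip_sql_from_plan_py plan_lines)

-- ===== LEMMAS AND PROOFS =====

-- startswith "SQL_ID" and startswith "Plan hash value" are mutually exclusive (heads differ)
lemma pv_excl (s : String) (h : PySem.Str.startswith s "SQL_ID" = true) :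
    PySem.Str.startswith s "Plan hash value" = false := by
  rw [PySem.Str.startswith_eq] at h ⊢
  rw [PySem.Chars.startswith_iff] at h
  obtain ⟨u, hu⟩ := h
  rw [Bool.eq_false_iff]
  intro hc
  rw [PySem.Chars.startswith_iff] at hc
  obtain ⟨v, hv⟩ := hc
  rw [← hu] at hv
  simp at hv

lemma pvALoop_found (lines : List String) : ∀ res : List String,
    pvALoop lines res true = (res ++ lines, true) := by
  induction lines with
  | nil => intro res; simp [pvALoop]
  | cons l rest ih =>
      intro res
      have h1 : pvALoop (l :: rest) res true = pvALoop rest (res ++ [l]) true := by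
        simp only [pvALoop]
        rw [if_neg (by simp)]
      rw [h1, ih]
      simp

lemma pvALoop_notfound (lines : List String) : ∀ res : List String,
    pvALoop lines res false =
      match lines.findIdx? (fun l => PySem.Str.startswith (PySem.Str.strip l) "Plan hash value") with
      | none => (res ++ lines.filter (fun l => PySem.Str.startswith (PySem.Str.strip l) "SQL_ID"), false)
      | some i => (res ++ (lines.take i).filter (fun l => PySem.Str.startswith (PySem.Str.strip l) "SQL_ID")
                    ++ lines.drop i, true) := by
  induction lines with
  | nil => intro res; simp [pvALoop]
  | cons l rest ih =>
      intro res
      rw [List.findIdx?_cons]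
      by_cases hq : PySem.Str.startswith (PySem.Str.strip l) "SQL_ID" = true
      · have hp := pv_excl _ hq
        have hqC : PySem.Chars.startswith (PySem.Chars.strip l.toList) ['S','Q','L','_','I','D'] = true := by
          simpa using hq
        have hpC : PySem.Chars.startswith (PySem.Chars.strip l.toList)
            ['P','l','a','n',' ','h','a','s','h',' ','v','a','l','u','e'] = false := by
          simpa using hp
        have h1 : pvALoop (l :: rest) res false = pvALoop rest (res ++ [l]) false := by
          simp only [pvALoop]
          rw [if_pos trivial, if_pos hq]
        rw [h1, ih]
        cases hfi : rest.findIdx? (fun l => PySem.Str.startswith (PySem.Str.strip l) "Plan hash value") with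
        | none => simp [hqC, hpC]
        | some i => simp [hqC, hpC]
      · by_cases hp : PySem.Str.startswith (PySem.Str.strip l) "Plan hash value" = true
        · have hpC : PySem.Chars.startswith (PySem.Chars.strip l.toList)
              ['P','l','a','n',' ','h','a','s','h',' ','v','a','l','u','e'] = true := by
            simpa using hp
          have h1 : pvALoop (l :: rest) res false = pvALoop rest (res ++ [l]) true := by
            simp only [pvALoop]
            rw [if_pos trivial, if_neg hq, if_pos hp]
          rw [h1, pvALoop_found]
          simp [hpC]
        · have hqC : PySem.Chars.startswith (PySem.Chars.strip l.toList) ['S','Q','L','_','I','D'] = false := by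
            simpa using hq
          have hpC : PySem.Chars.startswith (PySem.Chars.strip l.toList)
              ['P','l','a','n',' ','h','a','s','h',' ','v','a','l','u','e'] = false := by
            simpa using hp
          have h1 : pvALoop (l :: rest) res false = pvALoop rest res false := by
            simp only [pvALoop]
            rw [if_pos trivial, if_neg hq, if_neg hp]
            split <;> rfl
          rw [h1, ih]
          cases hfi : rest.findIdx? (fun l => PySem.Str.startswith (PySem.Str.strip l) "Plan hash value") with
          | none => simp [hqC, hpC]
          | some i => simp [hqC, hpC]

-- ===== VERDICT (by name: the statement is the Claim_ definition above) =====
theorem strip_sql_from_plan_py_spec : Claim_equal_strip_sql_from_plan_py := by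
  intro plan_lines _
  unfold Spec_strip_sql_from_plan_py strip_sql_from_plan_py strip_sql_from_plan_py_alt
  rw [pvALoop_notfound]
  cases hfi : plan_lines.findIdx? (fun l => PySem.Str.startswith (PySem.Str.strip l) "Plan hash value") with
  | none => simp
  | some i => simp
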